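-- pv_equiv track=rewrite | github.com/uoa-compsci399-s1-2022/Logic-driven-Context-Extension-Team-23 | Logiqa.py | find_end
-- ===== SOURCE A (Python) =====
-- def find_end(s: str):
--     res = []
--     for idx, char in enumerate(s):
--         if char == ".":
--             if s[idx - 2:idx] != "Mr":
--                 if idx != len(s) - 1:
--                     if s[idx + 1] == ",":
--                         continue
--                 res.append(idx)
--         elif char == ";":
--             res.append(idx)
--     return res
-- ===== SOURCE B (Python) =====
-- def find_end(s: str):
--     # Streaming state machine: one pass over the characters, no slicing or
--     # indexing.  A period is held as "pending" until the next character shows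
--     # it is not followed by a comma; the last two characters are carried in a
--     # rolling window for the "Mr" look-behind.
--     res = []
--     p2 = p1 = ""          # the two previously seen characters
--     pending = -1          # index of a '.' awaiting its successor, -1 if none
--     for idx, c in enumerate(s):
--         if pending >= 0:
--             if c != ",":
--                 res.append(pending)
--             pending = -1
--         if c == ";":
--             res.append(idx)
--         elif c == "." and not (p2 == "M" and p1 == "r"):
--             pending = idx
--         p2, p1 = p1, c
--     if pending >= 0:
--         res.append(pending)
--     return res
-- ===== Notes on version B (the rewrite author's own statement) =====
-- stated objective: alternative
-- what changed: Replaces A's slice-and-index lookarounds (the s[idx-2:idx] look-behind and the s[idx+1] look-ahead with a length test) by a single streaming state machine that carries the last two characters in a rolling window and defers each candidate period until the next character decides it, so B never slices or indexes the string.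
import Mathlib
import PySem

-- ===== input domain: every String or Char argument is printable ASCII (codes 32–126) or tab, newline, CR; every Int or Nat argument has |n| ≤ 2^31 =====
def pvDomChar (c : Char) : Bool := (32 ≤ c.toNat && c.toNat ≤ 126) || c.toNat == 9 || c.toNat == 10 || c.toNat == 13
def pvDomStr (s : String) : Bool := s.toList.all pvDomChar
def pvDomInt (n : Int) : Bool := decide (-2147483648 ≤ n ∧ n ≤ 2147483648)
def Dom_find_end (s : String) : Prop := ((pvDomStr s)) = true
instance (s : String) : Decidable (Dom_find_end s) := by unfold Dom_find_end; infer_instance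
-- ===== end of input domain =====

-- B replaces A's slice/index look-arounds by a one-pass streaming state machine
-- (rolling two-char window + a deferred 'pending' period); same O(n) cost.

-- ===== PORT A =====
-- literal port of Source A: for idx, char in enumerate(s), with the look-behind
-- slice s[idx-2:idx] (exact via PySem.List.slice, including its negative-start
-- clamping for idx < 2) and the look-ahead s[idx+1] (exact via
-- PySem.List.pyGet?; always in range there because idx ≠ len(s)-1).
def find_end_step (l : List Char) (res : List Int) (p : Int × Char) : List Int :=
  if p.2 = '.' then
    if PySem.List.slice l (some (p.1 - 2)) (some p.1) ≠ ['M', 'r'] then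
      if p.1 ≠ (l.length : Int) - 1 then
        if PySem.List.pyGet? l (p.1 + 1) = some ',' then res   -- continue
        else res ++ [p.1]
      else res ++ [p.1]
    else res
  else if p.2 = ';' then res ++ [p.1] else res

def find_end (s : String) : List Int :=
  (PySem.List.enumerate s.toList 0).foldl (find_end_step s.toList) []

-- ===== PORT B =====
-- literal port of Source B; the Python strings p2/p1 ("" or one char) are Option Char,
-- pending is the Int -1 / index exactly as in Source B.
def find_end_alt_go (res : List Int) (p2 p1 : Option Char) (pending idx : Int) :
    List Char → List Int
  | [] => if 0 ≤ pending then res ++ [pending] else res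
  | c :: rest =>
    let res1 := if 0 ≤ pending then (if c ≠ ',' then res ++ [pending] else res) else res
    if c = ';' then
      find_end_alt_go (res1 ++ [idx]) p1 (some c) (-1) (idx + 1) rest
    else if c = '.' ∧ ¬(p2 = some 'M' ∧ p1 = some 'r') then
      find_end_alt_go res1 p1 (some c) idx (idx + 1) rest
    else
      find_end_alt_go res1 p1 (some c) (-1) (idx + 1) rest

def find_end_alt (s : String) : List Int :=
  find_end_alt_go [] none none (-1) 0 s.toList

-- ===== PRECONDITION & SPEC =====
def Spec_find_end (s : String) (out : List Int) : Prop := out = find_end_alt s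
instance (s : String) (out : List Int) : Decidable (Spec_find_end s out) := by unfold Spec_find_end; infer_instance

-- ===== CLAIM (what is proved, stated in full; the proofs are below) =====
def Claim_equal_find_end : Prop := ∀ (s : String), Dom_find_end s → Spec_find_end s (find_end s)

-- ===== LEMMAS AND PROOFS =====

-- common middle form: recursion on the suffix carrying the two previous chars,
-- look-ahead read off the remaining list.
def feSpec (p2 p1 : Option Char) (idx : Int) : List Char → List Int
  | [] => []
  | c :: rest =>
    (if c = ';' ∨ (c = '.' ∧ ¬(p2 = some 'M' ∧ p1 = some 'r') ∧
        (rest = [] ∨ rest.head? ≠ some ',')) then [idx] else [])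
      ++ feSpec p1 (some c) (idx + 1) rest

-- B's state machine produces feSpec: pending is -1 or the index just before idx.
theorem go_eq_feSpec (rest : List Char) : ∀ (p2 p1 : Option Char) (idx pending : Int)
    (res : List Int), 0 ≤ idx → (pending = -1 ∨ (pending = idx - 1 ∧ 1 ≤ idx)) →
    find_end_alt_go res p2 p1 pending idx rest =
      res ++ (if 0 ≤ pending then (if rest.head? = some ',' then [] else [pending]) else [])
          ++ feSpec p2 p1 idx rest := by
  induction rest with
  | nil =>
    intro p2 p1 idx pending res hidx hpend
    rcases hpend with h | ⟨h, h1⟩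
    · subst h; simp [find_end_alt_go, feSpec]
    · have h0 : (0:Int) ≤ pending := by omega
      simp [find_end_alt_go, feSpec, h0]
  | cons c rest ih =>
    intro p2 p1 idx pending res hidx hpend
    have hstep : ∀ r : List Int,
        (if 0 ≤ pending then (if c ≠ ',' then r ++ [pending] else r) else r)
        = r ++ (if 0 ≤ pending then (if (c :: rest).head? = some ',' then [] else [pending]) else []) := by
      intro r
      rcases hpend with h | ⟨h, h1⟩
      · simp [h]
      · have h0 : (0:Int) ≤ pending := by omega
        by_cases hc : c = ',' <;> simp [h0, hc]
    by_cases hsemi : c = ';'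
    · simp only [find_end_alt_go, feSpec, hsemi]
      rw [ih p1 (some ';') (idx + 1) (-1) _ (by omega) (Or.inl rfl)]
      clear ih hstep; split_ifs <;> (try omega) <;> simp_all
    · by_cases hdot : c = '.' ∧ ¬(p2 = some 'M' ∧ p1 = some 'r')
      · simp only [find_end_alt_go, feSpec, if_neg hsemi, if_pos hdot, hstep]
        rw [ih p1 (some c) (idx + 1) idx _ (by omega) (Or.inr ⟨by omega, by omega⟩)]
        by_cases hhd : rest.head? = some ','
        · have hne : rest ≠ [] := by intro h; simp [h] at hhd
          simp [hdot.1, hdot.2, hhd, hne, hidx]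
        · simp [hdot.1, hdot.2, hhd, hidx]
      · simp only [find_end_alt_go, feSpec, if_neg hsemi, if_neg hdot, hstep]
        rw [ih p1 (some c) (idx + 1) (-1) _ (by omega) (Or.inl rfl)]
        have hcond : ¬(c = ';' ∨ c = '.' ∧ ¬(p2 = some 'M' ∧ p1 = some 'r') ∧
            (rest = [] ∨ rest.head? ≠ some ',')) := by
          rintro (h | ⟨h1, h2, _⟩)
          · exact hsemi h
          · exact hdot ⟨h1, h2⟩
        rw [if_neg hcond]
        clear ih hstep; split_ifs <;> (try omega) <;> simp_all

-- the look-behind slice s[idx-2:idx] read off the prefix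
theorem slice_prev2 (pre rest : List Char) (c : Char) :
    (PySem.List.slice (pre ++ c :: rest) (some ((pre.length : Int) - 2)) (some (pre.length : Int))
      = ['M', 'r'])
    ↔ (pre.dropLast.getLast? = some 'M' ∧ pre.getLast? = some 'r') := by
  rcases hr : pre.reverse with _ | ⟨b, t'⟩
  · have hpre : pre = [] := by simpa using congrArg List.reverse hr
    subst hpre
    constructor
    · intro h
      have := congrArg List.length h
      simp [PySem.List.length_slice] at this
    · rintro ⟨h, -⟩; simp at h
  · rcases t' with _ | ⟨a, t⟩
    · have hpre : pre = [b] := by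
        have := congrArg List.reverse hr; simpa using this
      subst hpre
      constructor
      · intro h
        have := congrArg List.length h
        simp [PySem.List.length_slice] at this
      · rintro ⟨h, -⟩; simp at h
    · have hpre : pre = t.reverse ++ [a, b] := by
        have := congrArg List.reverse hr; simpa using this
      subst hpre
      have hcast : ((t.reverse ++ [a, b]).length : Int) - 2 = ((t.length : Nat) : Int) := by
        simp
      have hn : ((t.reverse ++ [a, b]).length : Int) = (((t.length + 2 : Nat)) : Int) := by
        simp
      rw [hcast, hn, PySem.List.slice_natCast]
      have hdrop : ((t.reverse ++ [a, b] ++ c :: rest).drop t.length) = a :: b :: c :: rest := by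
        rw [List.append_assoc, List.drop_append_of_le_length (by simp)]
        simp
      rw [hdrop]
      have htake : (t.length + 2 - t.length) = 2 := by omega
      rw [htake]
      simp

-- A's fold over enumerate produces feSpec, generalised over the consumed prefix.
theorem foldl_eq_feSpec (rest : List Char) : ∀ (pre : List Char) (res : List Int),
    (PySem.List.enumerate rest (pre.length : Int)).foldl (find_end_step (pre ++ rest)) res
      = res ++ feSpec pre.dropLast.getLast? pre.getLast? (pre.length : Int) rest := by
  induction rest with
  | nil => intro pre res; simp [PySem.List.enumerate_nil, feSpec]
  | cons c rest ih =>
    intro pre res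
    rw [PySem.List.enumerate_cons, List.foldl_cons]
    have hlen : (pre ++ c :: rest).length = pre.length + 1 + rest.length := by simp; omega
    have hstep : find_end_step (pre ++ c :: rest) res ((pre.length : Int), c)
        = res ++ (if c = ';' ∨ (c = '.' ∧ ¬(pre.dropLast.getLast? = some 'M' ∧ pre.getLast? = some 'r') ∧
            (rest = [] ∨ rest.head? ≠ some ',')) then [(pre.length : Int)] else []) := by
      unfold find_end_step
      simp only
      by_cases hc : c = '.'
      · rw [if_pos hc]
        by_cases hmr : pre.dropLast.getLast? = some 'M' ∧ pre.getLast? = some 'r'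
        · rw [if_neg (by simpa using (slice_prev2 pre rest c).mpr hmr)]
          have : ¬(c = ';' ∨ c = '.' ∧ ¬(pre.dropLast.getLast? = some 'M' ∧ pre.getLast? = some 'r') ∧
              (rest = [] ∨ rest.head? ≠ some ',')) := by
            rintro (h | ⟨-, h, -⟩); · rw [hc] at h; simp at h
            · exact h hmr
          rw [if_neg this]; simp
        · rw [if_pos (by simpa using fun h => hmr ((slice_prev2 pre rest c).mp h))]
          by_cases hend : rest = []
          · have : ¬((pre.length : Int) ≠ ((pre ++ c :: rest).length : Int) - 1) := by
              rw [hlen, hend]; simp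
            rw [if_neg this]
            simp [hc, hmr, hend]
          · have hne : ((pre.length : Int) ≠ ((pre ++ c :: rest).length : Int) - 1) := by
              rw [hlen]
              have : rest.length ≠ 0 := by simpa [List.length_eq_zero_iff] using hend
              push_cast; omega
            rw [if_pos hne]
            have hget : PySem.List.pyGet? (pre ++ c :: rest) ((pre.length : Int) + 1)
                = rest.head? := by
              have h1 : ((pre.length : Int) + 1) = ((pre.length + 1 : Nat) : Int) := by push_cast; ring
              rw [h1, PySem.List.pyGet?_natCast]
              rw [List.getElem?_append_right (by omega)]
              simp [List.head?_eq_getElem?]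
            rw [hget]
            by_cases hhd : rest.head? = some ','
            · rw [if_pos hhd]
              have : ¬(c = ';' ∨ c = '.' ∧ ¬(pre.dropLast.getLast? = some 'M' ∧ pre.getLast? = some 'r') ∧
                  (rest = [] ∨ rest.head? ≠ some ',')) := by
                rintro (h | ⟨-, -, (h | h)⟩)
                · rw [hc] at h; simp at h
                · exact hend h
                · exact h hhd
              rw [if_neg this]; simp
            · rw [if_neg hhd]
              simp [hc, hmr, hhd]
      · rw [if_neg hc]
        by_cases hsemi : c = ';'
        · rw [if_pos hsemi]; simp [hsemi]
        · rw [if_neg hsemi]; simp [hsemi, hc]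
    rw [hstep]
    have hre : pre ++ c :: rest = (pre ++ [c]) ++ rest := by simp
    have hst : (pre.length : Int) + 1 = (((pre ++ [c]).length : Nat) : Int) := by simp
    rw [hre, hst, ih (pre ++ [c])]
    simp [feSpec]

-- ===== VERDICT (by name: the statement is the Claim_ definition above) =====
theorem find_end_spec : Claim_equal_find_end := by
  intro s _
  unfold Spec_find_end find_end find_end_alt
  have hA := foldl_eq_feSpec s.toList [] []
  simp only [List.length_nil, Int.natCast_zero, List.nil_append] at hA
  rw [hA]
  rw [go_eq_feSpec s.toList none none 0 (-1) [] (by omega) (Or.inl rfl)]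
  simp
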